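-- pv_equiv track=rewrite | github.com/queziaa/NLPCurriculum | HECTOR-main/data_loader.py | order_labels_by_level
-- ===== SOURCE A (Python) =====
-- from collections import OrderedDict
--
-- def order_labels_by_level(dataset, label2level):
--     """
--     The order in which key-value pairs are inserted in the label vocabulary is important
--     (we want that that labels of 1st level to go before labels of 2nd level etc.)
--     This function build an OrderedDict object, where keys are labels and values are frequency
--     (always 1, because we don't care about label frequency)
--     torchtext.vocab.vocab factory method takes an OrderedDict as an argument and insert keys to the vocabulary
--     w.r.t. the ordered in which they were inserted in OrderedDict
--     :param dataset: list of tuples [(str(x), str(y))], where x is a text and y is a sequence of labels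
--     :param label2level: dict {label: level}
--     :return: OrderedDict with ordered labels {label: 1}
--     """
--     labels_w_level = []
--
--     for _, labels in dataset:
--         for label in labels:
--             labels_w_level.append((label, label2level[label]))
--
--     labels_w_level = list(set(labels_w_level))  # remove duplicates
--     labels_w_level = sorted(labels_w_level, key=lambda x: x[1])
--     labels_ordered = [l for l, _ in labels_w_level]
--
--     labels_ordered_dict = OrderedDict.fromkeys(labels_ordered, value=1)
--
--     return labels_ordered_dict
-- ===== SOURCE B (Python) =====
-- from collections import OrderedDict
--
-- def order_labels_by_level(dataset, label2level):
--     # one set comprehension for the distinct (label, level) pairs, then a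
--     # bucket pass grouping labels by level and emitting buckets in level order
--     pairs = {(label, label2level[label]) for _, labels in dataset for label in labels}
--     buckets = {}
--     for label, lvl in pairs:
--         buckets.setdefault(lvl, []).append(label)
--     return OrderedDict((label, 1) for lvl in sorted(buckets) for label in buckets[lvl])
-- ===== Notes on version B (the rewrite author's own statement) =====
-- stated objective: alternative
-- what changed: A comparison-sorts all distinct (label, level) pairs by level and then builds the dict from the label sequence; B never sorts the pairs: it groups the distinct pairs into per-level buckets with one dict pass, sorts only the (few) distinct levels, and emits each bucket's labels in level order.
import Mathlib
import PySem

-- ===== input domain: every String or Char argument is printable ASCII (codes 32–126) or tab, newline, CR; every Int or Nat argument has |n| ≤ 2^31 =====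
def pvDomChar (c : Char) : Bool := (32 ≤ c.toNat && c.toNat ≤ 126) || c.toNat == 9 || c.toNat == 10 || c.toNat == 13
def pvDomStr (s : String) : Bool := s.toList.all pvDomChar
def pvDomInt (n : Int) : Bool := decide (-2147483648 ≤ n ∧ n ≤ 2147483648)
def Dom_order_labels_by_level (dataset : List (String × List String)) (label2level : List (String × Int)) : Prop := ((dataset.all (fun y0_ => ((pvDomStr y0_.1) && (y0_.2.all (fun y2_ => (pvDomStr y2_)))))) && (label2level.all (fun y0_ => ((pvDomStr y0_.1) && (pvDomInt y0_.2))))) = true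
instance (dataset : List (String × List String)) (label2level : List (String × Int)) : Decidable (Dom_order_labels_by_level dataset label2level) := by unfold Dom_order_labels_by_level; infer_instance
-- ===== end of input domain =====

-- B avoids sorting the distinct (label, level) pairs: it groups them into per-level
-- buckets with one dict pass and sorts only the distinct levels (return value only;
-- neither version mutates its arguments).

-- ===== PORT A =====
-- label2level[label] is KeyError when label is missing: Pre_ restricts to inputs where
-- every dataset label is a key, so the total Dict.getD (default 0, never reached) is exact there.
def order_labels_by_level (dataset : List (String × List String)) (label2level : List (String × Int)) : List (String × Int) :=
  let d2l : PySem.Dict String Int := PySem.Dict.ofList label2level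
  let labels_w_level : List (String × Int) :=
    dataset.foldl (fun acc pr =>
      pr.2.foldl (fun acc label => acc ++ [(label, PySem.Dict.getD d2l label 0)]) acc) []
  let dedupped : List (String × Int) := PySem.Set.ofList labels_w_level
  let sortedPairs : List (String × Int) := PySem.List.sorted dedupped (fun x => x.2)
  let labels_ordered : List String := sortedPairs.map (fun l => l.1)
  (labels_ordered.foldl (fun d l => PySem.Dict.insert d l 1) PySem.Dict.empty).items

-- ===== PORT B =====
def order_labels_by_level_alt (dataset : List (String × List String)) (label2level : List (String × Int)) : List (String × Int) :=
  let pairs : List (String × Int) :=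
    PySem.Set.ofList (dataset.flatMap (fun pr =>
      pr.2.map (fun label => (label, PySem.Dict.getD (PySem.Dict.ofList label2level) label 0))))
  let buckets : PySem.Dict Int (List String) :=
    pairs.foldl (fun d p => PySem.Dict.modify d p.2 [] (fun ls => ls ++ [p.1])) PySem.Dict.empty
  (PySem.Dict.ofList ((PySem.List.sorted (PySem.Dict.keys buckets) (fun x => x)).flatMap
    (fun lvl => (PySem.Dict.getD buckets lvl []).map (fun label => (label, (1 : Int)))))).items

-- ===== PRECONDITION & SPEC =====
-- Pre_: every label occurring in the dataset is a key of label2level (otherwise A raises KeyError).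
def Pre_order_labels_by_level (dataset : List (String × List String)) (label2level : List (String × Int)) : Prop :=
  ∀ pr ∈ dataset, ∀ label ∈ pr.2, label ∈ PySem.Dict.keys (PySem.Dict.ofList label2level)
instance (dataset : List (String × List String)) (label2level : List (String × Int)) : Decidable (Pre_order_labels_by_level dataset label2level) := by unfold Pre_order_labels_by_level; infer_instance
def pvWitness_order_labels_by_level : (List (String × List String)) × (List (String × Int)) :=
  ([("t", ["a", "b"])], [("a", 2), ("b", 1)])
def Spec_order_labels_by_level (dataset : List (String × List String)) (label2level : List (String × Int)) (out : List (String × Int)) : Prop := out = order_labels_by_level_alt dataset label2level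
instance (dataset : List (String × List String)) (label2level : List (String × Int)) (out : List (String × Int)) : Decidable (Spec_order_labels_by_level dataset label2level out) := by unfold Spec_order_labels_by_level; infer_instance

-- ===== CLAIM (what is proved, stated in full; the proofs are below) =====
def Claim_equal_order_labels_by_level : Prop := ∀ (dataset : List (String × List String)) (label2level : List (String × Int)), Dom_order_labels_by_level dataset label2level → Pre_order_labels_by_level dataset label2level → Spec_order_labels_by_level dataset label2level (order_labels_by_level dataset label2level)

-- ===== LEMMAS AND PROOFS =====

-- insertBy passes over a prefix none of whose elements the new element goes before
theorem insertBy_append_not_before {α : Type} (before : α → α → Bool) (x : α)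
    (A L : List α) (h : ∀ a ∈ A, before x a = false) :
    PySem.List.insertBy before x (A ++ L) = A ++ PySem.List.insertBy before x L := by
  induction A with
  | nil => simp
  | cons a A ih =>
    have ha : before x a = false := h a (by simp)
    simp only [List.cons_append, PySem.List.insertBy, ha, Bool.false_eq_true, if_false]
    rw [ih (fun a' ha' => h a' (by simp [ha']))]

-- insertBy goes to the front when the new element goes before every element
theorem insertBy_front {α : Type} (before : α → α → Bool) (x : α)
    (L : List α) (h : ∀ a ∈ L, before x a = true) :
    PySem.List.insertBy before x L = x :: L := by
  cases L with
  | nil => simp [PySem.List.insertBy]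
  | cons a L => simp [PySem.List.insertBy, h a (by simp)]

-- inserting a pair with level x.2 into strictly-level-ordered buckets appends it to its bucket
theorem insertBy_blocks (x : String × Int) (ks : List Int) (f : Int → List (String × Int))
    (hs : ks.Pairwise (· < ·)) (hv : x.2 ∈ ks)
    (hf : ∀ k ∈ ks, ∀ p ∈ f k, p.2 = k) :
    PySem.List.insertBy (fun a b => decide (a.2 < b.2)) x (ks.flatMap f)
      = ks.flatMap (fun k => f k ++ if x.2 == k then [x] else []) := by
  induction ks with
  | nil => simp at hv
  | cons k rest ih =>
    have hrest : ∀ k' ∈ rest, k < k' := (List.pairwise_cons.mp hs).1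
    by_cases hx : x.2 = k
    · have hpass : ∀ a ∈ f k, (decide (x.2 < a.2)) = false := by
        intro a ha
        have := hf k (by simp) a ha
        simp [this, hx]
      have hfront : ∀ b ∈ rest.flatMap f, (decide (x.2 < b.2)) = true := by
        intro b hb
        obtain ⟨k', hk', hbk'⟩ := List.mem_flatMap.mp hb
        have hb2 : b.2 = k' := hf k' (by simp [hk']) b hbk'
        have : k < k' := hrest k' hk'
        simp [hb2, hx]; omega
      have hcongr : rest.flatMap (fun k' => f k' ++ if x.2 == k' then [x] else []) = rest.flatMap f := by
        apply List.flatMap_congr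
        intro k' hk'
        have : x.2 ≠ k' := by have := hrest k' hk'; omega
        simp [this]
      simp only [List.flatMap_cons]
      rw [insertBy_append_not_before _ _ _ _ hpass, insertBy_front _ _ _ hfront, hcongr]
      simp [hx]
    · have hv' : x.2 ∈ rest := by simpa [hx] using hv
      have hkx : k < x.2 := hrest _ hv'
      have hpass : ∀ a ∈ f k, (decide (x.2 < a.2)) = false := by
        intro a ha
        have := hf k (by simp) a ha
        simp [this]; omega
      simp only [List.flatMap_cons]
      rw [insertBy_append_not_before _ _ _ _ hpass,
        ih (List.pairwise_cons.mp hs).2 hv' (fun k' hk' => hf k' (by simp [hk']))]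
      have : (x.2 == k) = false := by simp [hx]
      simp [this]

-- a stable sort by level is the concatenation of the level buckets in level order
theorem stable_sort_blocks (s : List (String × Int)) (ks : List Int)
    (hs : ks.Pairwise (· < ·)) (hsub : ∀ p ∈ s, p.2 ∈ ks) :
    PySem.List.sorted s (fun p => p.2)
      = ks.flatMap (fun k => s.filter (fun p => p.2 == k)) := by
  induction s using List.reverseRecOn with
  | nil => simp [PySem.List.sorted_eq_foldl_insertBy]
  | append_singleton s x ih =>
    rw [PySem.List.sorted_eq_foldl_insertBy, List.foldl_append, List.foldl_cons, List.foldl_nil,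
      ← PySem.List.sorted_eq_foldl_insertBy]
    rw [ih (fun p hp => hsub p (by simp [hp]))]
    rw [insertBy_blocks x ks _ hs (hsub x (by simp))
      (fun k _ p hp => by simpa using (List.mem_filter.mp hp).2)]
    apply List.flatMap_congr
    intro k _
    by_cases hk : x.2 = k <;> simp [List.filter_append, hk]

-- ===== VERDICT (by name: the statement is the Claim_ definition above) =====
theorem order_labels_by_level_spec : Claim_equal_order_labels_by_level := by
  intro dataset label2level _ _
  unfold Spec_order_labels_by_level order_labels_by_level order_labels_by_level_alt
  dsimp only
  -- A's append loop builds the same list as B's flatMap comprehension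
  have hP : dataset.foldl (fun acc pr =>
        pr.2.foldl (fun acc label =>
          acc ++ [(label, PySem.Dict.getD (PySem.Dict.ofList label2level) label 0)]) acc) []
      = dataset.flatMap (fun pr =>
          pr.2.map (fun label => (label, PySem.Dict.getD (PySem.Dict.ofList label2level) label 0))) := by
    rw [PySem.List.foldl_congr_mem' dataset _
      (fun acc pr => acc ++ pr.2.map (fun label =>
        (label, PySem.Dict.getD (PySem.Dict.ofList label2level) label 0))) []
      (fun pr _ acc => PySem.List.foldl_append_singleton_eq_map _ pr.2 acc),
      PySem.List.foldl_append_eq_flatMap]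
    simp
  rw [hP]
  set L : List (String × Int) := dataset.flatMap (fun pr =>
    pr.2.map (fun label => (label, PySem.Dict.getD (PySem.Dict.ofList label2level) label 0))) with hL
  set S : List (String × Int) := PySem.Set.ofList L with hSdef
  set ks : List Int := PySem.List.sorted (PySem.Set.ofList (S.map (fun p => p.2))) (fun x => x) with hks
  set buckets : PySem.Dict Int (List String) :=
    S.foldl (fun d p => PySem.Dict.modify d p.2 [] (fun ls => ls ++ [p.1])) PySem.Dict.empty with hbdef
  -- every distinct pair carries the level its label maps to
  have hform : ∀ p ∈ S, p.2 = PySem.Dict.getD (PySem.Dict.ofList label2level) p.1 0 := by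
    intro p hp
    rw [hSdef, PySem.Set.mem_ofList, hL, List.mem_flatMap] at hp
    obtain ⟨pr, _, hpm⟩ := hp
    obtain ⟨lab, _, rfl⟩ := List.mem_map.mp hpm
    rfl
  -- the distinct labels, in A's sorted order, have no duplicates
  have hnodupS : S.Nodup := PySem.Set.nodup_ofList L
  have hnodupLab : ((PySem.List.sorted S (fun p => p.2)).map (fun l => l.1)).Nodup := by
    have h1 : (S.map (fun l => l.1)).Nodup := by
      refine hnodupS.map_on ?_
      intro x hx y hy hxy
      have hx2 := hform x hx
      have hy2 := hform y hy
      exact Prod.ext hxy (by rw [hx2, hy2, hxy])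
    exact (((PySem.List.sorted_perm S (fun p => p.2) false).map (fun l => l.1)).nodup_iff).mpr h1
  -- the stable sort decomposes into level buckets
  have hsort : PySem.List.sorted S (fun p => p.2)
      = ks.flatMap (fun k => S.filter (fun p => p.2 == k)) := by
    refine stable_sort_blocks S ks (by rw [hks]; exact PySem.List.sorted_ofList_pairwise_lt _) ?_
    intro p hp
    rw [hks, PySem.List.mem_sorted, PySem.Set.mem_ofList]
    exact List.mem_map.mpr ⟨p, hp, rfl⟩
  -- B's buckets: keys are the distinct levels, each bucket is that level's labels
  have hkeys : buckets.keys = PySem.Set.ofList (S.map (fun p => p.2)) := by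
    rw [hbdef, PySem.Dict.keys_foldl_modify_key S (fun p => p.2) [] (fun _ p ls => ls ++ [p.1])
      PySem.Dict.empty]
    simp [PySem.Set.update, PySem.Set.ofList_eq_foldl]
  have hbuck : ∀ k, buckets.getD k [] = (S.filter (fun p => p.2 == k)).map (fun l => l.1) := by
    intro k
    have hswap : buckets = (S.map Prod.swap).foldl
        (fun d p => PySem.Dict.modify d p.1 [] (fun ls => ls ++ [p.2])) PySem.Dict.empty := by
      rw [hbdef, List.foldl_map]
      rfl
    rw [hswap, PySem.Dict.getD_foldl_modify_append]
    simp [List.filter_map, List.map_map, Function.comp_def]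
  -- both results are the same flat list of (label, 1) pairs
  have hlist : ((PySem.List.sorted S (fun p => p.2)).map (fun l => l.1)).map (fun l => (l, (1 : Int)))
      = ks.flatMap (fun lvl => (buckets.getD lvl []).map (fun label => (label, (1 : Int)))) := by
    rw [hsort]
    simp only [List.map_flatMap, List.map_map]
    exact List.flatMap_congr (fun k _ => by rw [hbuck k]; simp [List.map_map])
  -- A's fromkeys fold over distinct labels lists them with value 1
  have hAitems : (((PySem.List.sorted S (fun p => p.2)).map (fun l => l.1)).foldl
        (fun d l => PySem.Dict.insert d l 1) PySem.Dict.empty).items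
      = ((PySem.List.sorted S (fun p => p.2)).map (fun l => l.1)).map (fun l => (l, (1 : Int))) := by
    have h := PySem.Dict.items_foldl_insert_fresh
      ((PySem.List.sorted S (fun p => p.2)).map (fun l => l.1)) (fun l => l) (fun _ => (1 : Int))
      PySem.Dict.empty (fun a _ => PySem.Dict.contains_empty a) (by simpa using hnodupLab)
    simpa [PySem.Dict.empty] using h
  -- B's dict over distinct labels lists its pairs unchanged
  have hBitems : (PySem.Dict.ofList (ks.flatMap
        (fun lvl => (buckets.getD lvl []).map (fun label => (label, (1 : Int)))))).items
      = ks.flatMap (fun lvl => (buckets.getD lvl []).map (fun label => (label, (1 : Int)))) := by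
    have hnd :
        ((ks.flatMap (fun lvl => (buckets.getD lvl []).map
          (fun label => (label, (1 : Int))))).map (fun p => p.1)).Nodup := by
      have : (ks.flatMap (fun lvl => (buckets.getD lvl []).map
          (fun label => (label, (1 : Int))))).map (fun p => p.1)
          = ((PySem.List.sorted S (fun p => p.2)).map (fun l => l.1)) := by
        rw [← hlist]; simp [List.map_map]
      rw [this]
      exact hnodupLab
    have h := PySem.Dict.items_foldl_insert_fresh
      (ks.flatMap (fun lvl => (buckets.getD lvl []).map (fun label => (label, (1 : Int)))))
      (fun p => p.1) (fun p => p.2) PySem.Dict.empty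
      (fun a _ => PySem.Dict.contains_empty a.1) hnd
    simpa [PySem.Dict.ofList, PySem.Dict.update, PySem.Dict.empty] using h
  rw [hkeys]
  rw [hAitems, hlist, hBitems]
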